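-- pv_equiv track=rewrite | github.com/unleashedgenius/exif-sniffer | src/exifsniffer/security.py | host_suffix_allowed
-- ===== SOURCE A (Python) =====
-- def host_suffix_allowed(hostname: str, allowed: frozenset[str] | None, blocked: frozenset[str] | None) -> bool:
--     """If *allowed* is set, hostname must end with one of the suffixes. *blocked* always applies."""
--     h = hostname.lower().rstrip(".")
--     if blocked:
--         for suf in blocked:
--             if suf and (h == suf.lower() or h.endswith("." + suf.lower())):
--                 return False
--     if allowed is None:
--         return True
--     for suf in allowed:
--         if suf and (h == suf.lower() or h.endswith("." + suf.lower())):
--             return True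
--     return False
-- ===== SOURCE B (Python) =====
-- def host_suffix_allowed(hostname, allowed, blocked):
--     """Candidate-suffix-set formulation: compute every domain suffix of the
--     hostname once, then decide by set intersection instead of per-suffix
--     endswith scans."""
--     h = hostname.lower().rstrip(".")
--     cands = {h}
--     rest = h
--     while "." in rest:
--         rest = rest.split(".", 1)[1]
--         cands.add(rest)
--     blk = {s.lower() for s in (blocked or ()) if s}
--     if cands & blk:
--         return False
--     if allowed is None:
--         return True
--     alw = {s.lower() for s in allowed if s}
--     return bool(cands & alw)
-- ===== Notes on version B (the rewrite author's own statement) =====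
-- stated objective: alternative
-- what changed: Instead of scanning every allowed/blocked suffix with '==' and endswith, B computes the hostname's set of candidate domain suffixes once (walking past each dot) and decides both checks by set intersection with the lowercased, empty-free suffix sets.
import Mathlib
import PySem

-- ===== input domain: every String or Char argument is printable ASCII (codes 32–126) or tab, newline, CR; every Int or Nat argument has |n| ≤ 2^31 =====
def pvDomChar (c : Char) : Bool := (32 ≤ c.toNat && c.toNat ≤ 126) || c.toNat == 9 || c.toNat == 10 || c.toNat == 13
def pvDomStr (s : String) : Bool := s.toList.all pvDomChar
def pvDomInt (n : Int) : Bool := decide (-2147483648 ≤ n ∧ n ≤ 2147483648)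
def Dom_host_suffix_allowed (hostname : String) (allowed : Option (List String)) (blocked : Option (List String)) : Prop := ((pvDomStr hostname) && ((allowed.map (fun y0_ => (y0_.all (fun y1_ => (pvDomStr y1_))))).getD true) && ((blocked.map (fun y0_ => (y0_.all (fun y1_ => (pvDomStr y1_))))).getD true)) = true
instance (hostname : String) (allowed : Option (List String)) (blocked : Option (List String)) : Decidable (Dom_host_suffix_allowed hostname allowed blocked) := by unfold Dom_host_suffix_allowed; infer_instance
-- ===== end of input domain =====

-- B replaces the per-suffix '=='/endswith scans by a candidate-suffix set intersected with
-- the lowercased suffix sets (objective: alternative decomposition, same exact behaviour).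

-- ===== PORT A =====

-- hostname.lower().rstrip(".")  — hand port of rstrip("."): drops exactly the trailing '.'
-- characters (exact); shared by both ports because both Pythons start with this same line.
def hsNorm (s : String) : List Char :=
  ((PySem.Chars.lower s.toList).reverse.dropWhile (fun c => c == '.')).reverse

-- 'suf and (h == suf.lower() or h.endswith("." + suf.lower()))'
def hsMatch (h : List Char) (suf : String) : Bool :=
  decide (suf ≠ "") &&
    (h == PySem.Chars.lower suf.toList
      || PySem.Chars.endswith h ('.' :: PySem.Chars.lower suf.toList))

-- 'for suf in l: if …: return <v>' — early-exit scan; true = some suffix matched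
def hsScan (h : List Char) : List String → Bool
  | [] => false
  | suf :: rest => if hsMatch h suf then true else hsScan h rest

def host_suffix_allowed (hostname : String) (allowed : Option (List String)) (blocked : Option (List String)) : Bool :=
  let h := hsNorm hostname
  let blockedHit :=
    match blocked with
    | none => false                                   -- 'if blocked:' — None is falsy
    | some bl => if bl.isEmpty then false else hsScan h bl   -- empty set is falsy too
  if blockedHit then false
  else
    match allowed with
    | none => true
    | some al => hsScan h al

-- ===== PORT B =====

-- rest.split(".", 1)[1] for a rest containing '.' (exact: the part after the FIRST dot)
def hsAfterDot (l : List Char) : List Char :=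
  (l.dropWhile (fun c => !(c == '.'))).tail

-- termination helpers for hsCands (cited by name in decreasing_by)
theorem hsIsIn_dot_mem (l : List Char) (h : PySem.Chars.isIn ['.'] l = true) : '.' ∈ l :=
  ((PySem.Chars.isIn_iff_infix _ _).mp h).subset (List.mem_singleton_self _)

theorem hsAfterDot_length_lt (l : List Char) (h : '.' ∈ l) :
    (hsAfterDot l).length < l.length := by
  have hne : l.dropWhile (fun c => !(c == '.')) ≠ [] := by
    intro hnil
    have := (List.dropWhile_eq_nil_iff).mp hnil '.' h
    simp at this
  have h1 : (l.dropWhile (fun c => !(c == '.'))).length ≤ l.length :=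
    List.length_dropWhile_le _ _
  have h2 : 0 < (l.dropWhile (fun c => !(c == '.'))).length :=
    List.length_pos_iff.mpr hne
  simp only [hsAfterDot, List.length_tail]
  omega

-- the while loop of B: cands = {h} plus the part after each dot, walked left to right
def hsCands (l : List Char) : List (List Char) :=
  l :: (if PySem.Chars.isIn ['.'] l then hsCands (hsAfterDot l) else [])
termination_by l.length
decreasing_by exact hsAfterDot_length_lt _ (hsIsIn_dot_mem _ (by assumption))

-- {s.lower() for s in xs if s}
def hsLowSet (xs : List String) : PySem.Set (List Char) :=
  PySem.Set.ofList ((xs.filter (fun s => decide (s ≠ ""))).map (fun s => PySem.Chars.lower s.toList))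

def host_suffix_allowed_alt (hostname : String) (allowed : Option (List String)) (blocked : Option (List String)) : Bool :=
  let h := hsNorm hostname
  let cands : PySem.Set (List Char) := PySem.Set.ofList (hsCands h)
  let blk := hsLowSet (blocked.getD [])              -- (blocked or ())
  if !(PySem.Set.inter cands blk).isEmpty then false -- 'if cands & blk: return False'
  else
    match allowed with
    | none => true
    | some al => !(PySem.Set.inter cands (hsLowSet al)).isEmpty

-- ===== PRECONDITION & SPEC =====
def Spec_host_suffix_allowed (hostname : String) (allowed : Option (List String)) (blocked : Option (List String)) (out : Bool) : Prop := out = host_suffix_allowed_alt hostname allowed blocked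
instance (hostname : String) (allowed : Option (List String)) (blocked : Option (List String)) (out : Bool) : Decidable (Spec_host_suffix_allowed hostname allowed blocked out) := by unfold Spec_host_suffix_allowed; infer_instance

-- ===== CLAIM (what is proved, stated in full; the proofs are below) =====
def Claim_equal_host_suffix_allowed : Prop := ∀ (hostname : String) (allowed : Option (List String)) (blocked : Option (List String)), Dom_host_suffix_allowed hostname allowed blocked → Spec_host_suffix_allowed hostname allowed blocked (host_suffix_allowed hostname allowed blocked)

-- ===== LEMMAS AND PROOFS =====

-- first-dot decomposition: l = (dot-free prefix) ++ '.' :: hsAfterDot l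
theorem hs_split_first_dot (l : List Char) (h : '.' ∈ l) :
    '.' ∉ l.takeWhile (fun c => !(c == '.')) ∧
      l = l.takeWhile (fun c => !(c == '.')) ++ '.' :: hsAfterDot l := by
  induction l with
  | nil => cases h
  | cons c t ih =>
    by_cases hc : c = '.'
    · subst hc
      constructor
      · simp
      · simp [hsAfterDot]
    · have hct : '.' ∈ t := by
        rcases List.mem_cons.mp h with h' | h'
        · exact absurd h'.symm hc
        · exact h'
      obtain ⟨ih1, ih2⟩ := ih hct
      have hb : (!(c == '.')) = true := by simp [hc]
      constructor
      · simp only [List.takeWhile_cons, hb, if_true, List.mem_cons]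
        rintro (h' | h')
        · exact hc h'.symm
        · exact ih1 h'
      · simp only [hsAfterDot, List.takeWhile_cons, List.dropWhile_cons, hb, if_true,
          List.cons_append] at ih2 ⊢
        exact congrArg (c :: ·) ih2

-- suffixes through the first dot: with p dot-free, '.'::s ends p ++ '.'::r iff s = r or it ends r
theorem hs_dot_suffix_iff (p r s : List Char) (hp : '.' ∉ p) :
    ('.' :: s <:+ p ++ '.' :: r) ↔ (s = r ∨ '.' :: s <:+ r) := by
  constructor
  · intro hs
    have hr : ('.' :: r) <:+ p ++ '.' :: r := List.suffix_append _ _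
    rcases List.suffix_or_suffix_of_suffix hs hr with h1 | h1
    · rcases List.suffix_cons_iff.mp h1 with h2 | h2
      · injection h2 with _ h3
        exact Or.inl h3
      · exact Or.inr h2
    · rcases List.suffix_cons_iff.mp h1 with h2 | h2
      · injection h2 with _ h3
        exact Or.inl h3.symm
      · -- '.'::r is a proper suffix of s: the dot before s falls inside dot-free p — impossible
        exfalso
        obtain ⟨a, ha⟩ := hs
        have hlen : a.length + (s.length + 1) = p.length + (r.length + 1) := by
          have := congrArg List.length ha
          simpa using this
        have hrs : r.length + 1 ≤ s.length := by
          simpa using h2.length_le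
        have halt : a.length < p.length := by omega
        have e1 : (a ++ '.' :: s)[a.length]? = some '.' := by
          rw [List.getElem?_append_right (by omega)]
          simp
        rw [ha] at e1
        rw [List.getElem?_append_left halt, List.getElem?_eq_getElem halt] at e1
        have e2 : p[a.length]'halt = '.' := by
          simpa using e1
        have hmem' : p[a.length]'halt ∈ p := List.getElem_mem _
        rw [e2] at hmem'
        exact hp hmem'
  · intro hs
    rcases hs with rfl | hs
    · exact List.suffix_append _ _
    · exact hs.trans ((List.suffix_cons _ _).trans (List.suffix_append _ _))

-- characterisation of the candidate set: exactly h itself and the part after each dot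
theorem hs_mem_cands (l : List Char) (s : List Char) :
    s ∈ hsCands l ↔ (s = l ∨ ('.' :: s) <:+ l) := by
  induction l using hsCands.induct with
  | _ l =>
    rw [hsCands]
    by_cases hd : PySem.Chars.isIn ['.'] l = true
    · rename_i ih
      have hmem : '.' ∈ l := hsIsIn_dot_mem l hd
      obtain ⟨hp, hsplit⟩ := hs_split_first_dot l hmem
      rw [if_pos hd]
      have hsuffix : ('.' :: s <:+ l) ↔ (s = hsAfterDot l ∨ '.' :: s <:+ hsAfterDot l) := by
        conv_lhs => rw [hsplit]
        exact hs_dot_suffix_iff _ _ _ hp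
      simp only [List.mem_cons, ih hd, hsuffix]
    · rw [if_neg hd]
      simp only [List.mem_cons, List.not_mem_nil, or_false]
      constructor
      · exact fun h => Or.inl h
      · rintro (h | h)
        · exact h
        · exfalso
          apply hd
          apply (PySem.Chars.isIn_iff_infix _ _).mpr
          have hm : '.' ∈ l := h.subset (by simp)
          obtain ⟨u, v, huv⟩ := List.append_of_mem hm
          exact ⟨u, v, by rw [huv]; simp⟩

-- the A-side match test, in terms of the candidate set
theorem hs_match_iff (h : List Char) (suf : String) :
    hsMatch h suf = true ↔ (suf ≠ "" ∧ PySem.Chars.lower suf.toList ∈ hsCands h) := by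
  rw [hs_mem_cands]
  simp only [hsMatch, Bool.and_eq_true, decide_eq_true_eq, Bool.or_eq_true, beq_iff_eq,
    PySem.Chars.endswith_iff]
  constructor
  · rintro ⟨h1, h2 | h2⟩
    · exact ⟨h1, Or.inl h2.symm⟩
    · exact ⟨h1, Or.inr h2⟩
  · rintro ⟨h1, h2 | h2⟩
    · exact ⟨h1, Or.inl h2.symm⟩
    · exact ⟨h1, Or.inr h2⟩

-- A's early-exit scan is List.any
theorem hs_scan_eq_any (h : List Char) (l : List String) : hsScan h l = l.any (hsMatch h) := by
  induction l with
  | nil => rfl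
  | cons suf rest ih =>
    simp only [hsScan, List.any_cons, ih]
    by_cases hm : hsMatch h suf
    · simp [hm]
    · simp [hm]

-- B's intersection test equals A's scan
theorem hs_inter_eq_scan (h : List Char) (l : List String) :
    (PySem.Set.inter (PySem.Set.ofList (hsCands h)) (hsLowSet l)).isEmpty = !(hsScan h l) := by
  rw [Bool.eq_iff_iff, List.isEmpty_iff, Bool.not_eq_true', ← Bool.not_eq_true,
    hs_scan_eq_any]
  rw [List.eq_nil_iff_forall_not_mem]
  constructor
  · intro hempty
    rw [List.any_eq_true]
    rintro ⟨suf, hsuf, hm⟩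
    obtain ⟨h1, h2⟩ := (hs_match_iff h suf).mp hm
    apply hempty (PySem.Chars.lower suf.toList)
    rw [PySem.Set.mem_inter]
    refine ⟨(PySem.Set.mem_ofList _ _).mpr h2, ?_⟩
    rw [hsLowSet, PySem.Set.mem_ofList, List.mem_map]
    exact ⟨suf, List.mem_filter.mpr ⟨hsuf, by simpa using h1⟩, rfl⟩
  · intro hno x hx
    rw [PySem.Set.mem_inter, PySem.Set.mem_ofList, hsLowSet, PySem.Set.mem_ofList,
      List.mem_map] at hx
    obtain ⟨hc, suf, hsuf, rfl⟩ := hx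
    obtain ⟨hsuf', hne⟩ := List.mem_filter.mp hsuf
    apply hno
    rw [List.any_eq_true]
    exact ⟨suf, hsuf', (hs_match_iff h suf).mpr ⟨by simpa using hne, hc⟩⟩

-- A's 'if blocked:' guard collapses: an empty scan is false anyway
theorem hs_blockedHit_eq (h : List Char) (bl : Option (List String)) :
    (match bl with
      | none => false
      | some l => if l.isEmpty then false else hsScan h l) = hsScan h (bl.getD []) := by
  cases bl with
  | none => rfl
  | some l =>
    cases l with
    | nil => rfl
    | cons a t => rfl

-- ===== VERDICT (by name: the statement is the Claim_ definition above) =====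
theorem host_suffix_allowed_spec : Claim_equal_host_suffix_allowed := by
  intro hostname allowed blocked _
  unfold Spec_host_suffix_allowed
  simp only [host_suffix_allowed, host_suffix_allowed_alt, hs_blockedHit_eq,
    hs_inter_eq_scan, Bool.not_not]
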